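-- pv_equiv track=rewrite | github.com/dovydasjaru/AOC | 2024/day21.py | Dictionarise
-- ===== SOURCE A (Python) =====
-- def Dictionarise(code: str) -> dict[str, int]:
--     subCodes: dict[str, int] = {}
--     for sub in code.split("A")[:-1]:
--         if subCodes.get(sub + "A", None) == None:
--             subCodes[sub + "A"] = 1
--         else:
--             subCodes[sub + "A"] += 1
--
--     return subCodes
-- ===== SOURCE B (Python) =====
-- def Dictionarise(code: str) -> dict[str, int]:
--     counts: dict[str, int] = {}
--     buffer = ""
--     for ch in code:
--         if ch == "A":
--             key = buffer + "A"
--             counts[key] = counts.get(key, 0) + 1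
--             buffer = ""
--         else:
--             buffer += ch
--     return counts
-- ===== Notes on version B (the rewrite author's own statement) =====
-- stated objective: alternative
-- what changed: Replaces split('A')[:-1]-then-count with a single manual character scan that maintains a current-chunk buffer, counting buffer+'A' each time an 'A' is seen and silently dropping the trailing unterminated buffer.
import Mathlib
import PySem

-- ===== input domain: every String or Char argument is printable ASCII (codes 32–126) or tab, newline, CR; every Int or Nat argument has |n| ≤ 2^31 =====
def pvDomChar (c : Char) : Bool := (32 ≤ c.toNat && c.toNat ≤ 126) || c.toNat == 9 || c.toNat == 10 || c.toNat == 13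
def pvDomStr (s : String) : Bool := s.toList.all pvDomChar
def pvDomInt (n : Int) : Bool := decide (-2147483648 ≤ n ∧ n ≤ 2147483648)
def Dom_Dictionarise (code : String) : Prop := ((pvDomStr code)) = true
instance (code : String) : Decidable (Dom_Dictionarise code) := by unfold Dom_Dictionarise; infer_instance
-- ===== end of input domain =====

-- B replaces split("A")[:-1]-then-count by one manual character scan with a chunk buffer (alternative decomposition, same cost).

-- ===== PORT A =====
-- code.split("A")[:-1], then the get-or-initialise counting loop; dict returned as its items list
def Dictionarise (code : String) : List (String × Int) :=
  let pieces := (PySem.Str.split? code "A").getD []   -- sep "A" ≠ "", so split? is always `some` here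
  let pieces := PySem.List.slice pieces none (some (-1))   -- [:-1]
  (pieces.foldl (fun subCodes sub =>
      match subCodes.get? (sub ++ "A") with
      | none => subCodes.insert (sub ++ "A") (1 : Int)
      | some v => subCodes.insert (sub ++ "A") (v + 1))
    PySem.Dict.empty).items

-- ===== PORT B =====
-- one left-to-right pass: buffer the current chunk, count buffer+"A" at each 'A', drop the trailing buffer
def Dictionarise_alt (code : String) : List (String × Int) :=
  (code.toList.foldl
    (fun (st : PySem.Dict String Int × List Char) ch =>
      if ch = 'A' then
        let key := String.ofList (st.2 ++ ['A'])
        (st.1.insert key (st.1.getD key 0 + 1), ([] : List Char))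
      else
        (st.1, st.2 ++ [ch]))
    (PySem.Dict.empty, [])).1.items

-- ===== PRECONDITION & SPEC =====
def Spec_Dictionarise (code : String) (out : List (String × Int)) : Prop := out = Dictionarise_alt code
instance (code : String) (out : List (String × Int)) : Decidable (Spec_Dictionarise code out) := by unfold Spec_Dictionarise; infer_instance

-- ===== CLAIM (what is proved, stated in full; the proofs are below) =====
def Claim_equal_Dictionarise : Prop := ∀ (code : String), Dom_Dictionarise code → Spec_Dictionarise code (Dictionarise code)

-- ===== LEMMAS AND PROOFS =====

-- reference splitter: Python's code.split("A") for the single-char separator 'A'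
def pvSplit (cur : List Char) : List Char → List (List Char)
  | [] => [cur]
  | c :: cs => if c = 'A' then cur :: pvSplit [] cs else pvSplit (cur ++ [c]) cs

lemma pvSplit_ne_nil (cur : List Char) (cs : List Char) : pvSplit cur cs ≠ [] := by
  induction cs generalizing cur with
  | nil => simp [pvSplit]
  | cons c cs ih =>
    by_cases h : c = 'A'
    · simp [pvSplit, h]
    · simp only [pvSplit, if_neg h]
      exact ih _

lemma splitOn_go_spec (fuel : Nat) (l cur : List Char) (acc : List (List Char))
    (h : l.length ≤ fuel) :
    PySem.Chars.splitOn.go ['A'] fuel l cur acc =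
      acc.reverse ++ pvSplit cur.reverse l := by
  induction fuel generalizing l cur acc with
  | zero =>
    have : l = [] := by cases l <;> simp_all
    subst this
    simp [PySem.Chars.splitOn.go, pvSplit]
  | succ n ih =>
    cases l with
    | nil => simp [PySem.Chars.splitOn.go, pvSplit]
    | cons c rest =>
      by_cases hc : c = 'A'
      · subst hc
        have hpre : List.isPrefixOf ['A'] ('A' :: rest) = true := by simp [List.isPrefixOf]
        have := ih rest [] (cur.reverse :: acc) (by simpa using Nat.le_of_succ_le_succ h)
        simp [PySem.Chars.splitOn.go, hpre, pvSplit] at this ⊢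
        simpa using this
      · have hpre : List.isPrefixOf ['A'] (c :: rest) = true ↔ False := by
          simp [List.isPrefixOf]; intro hh; exact hc hh.symm
        have := ih rest (c :: cur) acc (by simpa using Nat.le_of_succ_le_succ h)
        simp [PySem.Chars.splitOn.go, hc, pvSplit, hpre] at this ⊢
        simpa using this

lemma splitOn_eq_pvSplit (cs : List Char) :
    PySem.Chars.splitOn cs ['A'] = pvSplit [] cs := by
  have := splitOn_go_spec (cs.length + 1) cs [] [] (by omega)
  simpa [PySem.Chars.splitOn] using this

-- the counting step, keyed on a chunk of characters
def pvStep (d : PySem.Dict String Int) (chunk : List Char) : PySem.Dict String Int :=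
  d.insert (String.ofList (chunk ++ ['A'])) (d.getD (String.ofList (chunk ++ ['A'])) 0 + 1)

lemma altLoop_eq (cs : List Char) (d : PySem.Dict String Int) (buf : List Char) :
    (cs.foldl
      (fun (st : PySem.Dict String Int × List Char) ch =>
        if ch = 'A' then
          let key := String.ofList (st.2 ++ ['A'])
          (st.1.insert key (st.1.getD key 0 + 1), ([] : List Char))
        else
          (st.1, st.2 ++ [ch]))
      (d, buf)).1 = ((pvSplit buf cs).dropLast).foldl pvStep d := by
  induction cs generalizing d buf with
  | nil => simp [pvSplit]
  | cons c cs ih =>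
    by_cases hc : c = 'A'
    · subst hc
      simp only [List.foldl_cons, if_true]
      rw [ih]
      have hne := pvSplit_ne_nil ([] : List Char) cs
      simp [pvSplit, List.dropLast_cons_of_ne_nil hne, pvStep]
    · simp only [List.foldl_cons, if_neg hc]
      rw [ih]
      simp [pvSplit, hc]

lemma aStep_eq (d : PySem.Dict String Int) (sub : String) :
    (match d.get? (sub ++ "A") with
      | none => d.insert (sub ++ "A") (1 : Int)
      | some v => d.insert (sub ++ "A") (v + 1)) = pvStep d sub.toList := by
  have hkey : sub ++ "A" = String.ofList (sub.toList ++ ['A']) := by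
    conv_lhs => rw [← String.ofList_toList (s := sub)]
    rw [← String.ofList_append]
  rw [pvStep, ← hkey, PySem.Dict.getD_eq_get?_getD]
  cases h : d.get? (sub ++ "A") <;> simp

lemma aFold_eq (ls : List String) (d : PySem.Dict String Int) :
    ls.foldl (fun subCodes sub =>
      match subCodes.get? (sub ++ "A") with
      | none => subCodes.insert (sub ++ "A") (1 : Int)
      | some v => subCodes.insert (sub ++ "A") (v + 1)) d
      = (ls.map String.toList).foldl pvStep d := by
  induction ls generalizing d with
  | nil => rfl
  | cons s ls ih =>
    simp only [List.foldl_cons, List.map_cons]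
    rw [aStep_eq]
    exact ih _

lemma split?_A (code : String) :
    PySem.Str.split? code "A" = some ((PySem.Chars.splitOn code.toList ['A']).map String.ofList) := by
  have hb := PySem.Str.split?_map code "A"
  have hsep : ("A" : String).toList = ['A'] := rfl
  rw [hsep] at hb
  have hs : PySem.Chars.split? code.toList ['A'] = some (PySem.Chars.splitOn code.toList ['A']) := by
    simp [PySem.Chars.split?]
  rw [hs] at hb
  cases h : PySem.Str.split? code "A" with
  | none => rw [h] at hb; simp at hb
  | some l =>
    rw [h] at hb
    simp only [Option.map_some, Option.some.injEq] at hb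
    rw [← hb, List.map_map]
    simp [Function.comp_def]

-- ===== VERDICT (by name: the statement is the Claim_ definition above) =====
theorem Dictionarise_spec : Claim_equal_Dictionarise := by
  intro code _
  show Dictionarise code = Dictionarise_alt code
  unfold Dictionarise Dictionarise_alt
  rw [split?_A]
  simp only [Option.getD_some, PySem.List.slice_to_neg_one]
  rw [aFold_eq, altLoop_eq]
  congr 1
  rw [← List.map_dropLast, List.map_map, splitOn_eq_pvSplit]
  have : String.toList ∘ String.ofList = id := by
    funext l; simp
  rw [this, List.map_id]
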